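-- pv_equiv track=rewrite | github.com/pongpatapee/advent-of-code | 2023/day3/day3_part2.py | parse_num_and_space
-- ===== SOURCE A (Python) =====
-- def parse_num_and_space(input, num_id):
--     output = []
--
--     num_str = ""
--     for n in input:
--         if not n.isdigit():
--             if num_str:
--                 # append number for x
--                 num_id.append(num_str)
--
--                 while "x" in output:
--                     x_ind = output.index("x")
--                     output[x_ind] = str(len(num_id) - 1)
--
--                 num_str = ""
--
--             output.append(n)
--
--         else:
--             output.append("x")  # mark spot where I should place numbers
--             num_str += n
--
--     if num_str:
--         # append number for x
--         num_id.append(num_str)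
--
--         while "x" in output:
--             x_ind = output.index("x")
--             output[x_ind] = str(len(num_id) - 1)
--
--         num_str = ""
--
--     return output, num_id
-- ===== SOURCE B (Python) =====
-- # Same task, one pass: remember the indices of the "x" cells awaiting a number id
-- # and write the id straight into them, instead of rescanning output with .index()
-- # after every completed number.  Mutates num_id in place exactly like the original.
-- def parse_num_and_space(input, num_id):
--     output = []
--     pending = []  # indices of output cells currently equal to "x"
--     num = []      # digits of the number being built
--
--     def flush():
--         nonlocal pending, num
--         num_id.append("".join(num))
--         id_str = str(len(num_id) - 1)
--         for i in pending:
--             output[i] = id_str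
--         pending = []
--         num = []
--
--     for n in input:
--         if n.isdigit():
--             pending.append(len(output))
--             output.append("x")
--             num.append(n)
--         else:
--             if num:
--                 flush()
--             if n == "x":
--                 pending.append(len(output))
--             output.append(n)
--
--     if num:
--         flush()
--
--     return output, num_id
-- ===== Notes on version B (the rewrite author's own statement) =====
-- stated objective: alternative
-- what changed: Instead of rescanning the output with `"x" in output` / `output.index("x")` after every completed number, B records the indices of the output cells currently holding "x" (digit markers, and literal 'x' characters, which A also overwrites) and writes the id string directly into those cells.
import Mathlib
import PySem

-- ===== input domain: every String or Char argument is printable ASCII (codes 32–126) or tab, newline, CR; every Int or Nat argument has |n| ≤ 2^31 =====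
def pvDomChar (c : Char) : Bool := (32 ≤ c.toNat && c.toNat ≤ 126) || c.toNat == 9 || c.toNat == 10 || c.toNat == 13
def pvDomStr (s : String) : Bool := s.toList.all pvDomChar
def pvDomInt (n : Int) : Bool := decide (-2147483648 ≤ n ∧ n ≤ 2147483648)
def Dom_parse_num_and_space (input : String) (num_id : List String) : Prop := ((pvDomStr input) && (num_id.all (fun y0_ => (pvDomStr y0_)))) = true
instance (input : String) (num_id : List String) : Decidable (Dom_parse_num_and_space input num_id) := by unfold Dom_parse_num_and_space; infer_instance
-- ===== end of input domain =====

-- B replaces A's repeated `output.index("x")` rescans by directly-tracked indices (one pass).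
-- A mutates num_id in place (append); B performs the same mutation; the theorem is about the return value.

-- ===== PORT A =====
-- A's `while "x" in output: output[output.index("x")] = v`.
-- Fuel = output.count "x" is exact: v is a decimal id string, never "x", so each
-- iteration removes one "x"; when no "x" is left (index? = none) the loop stops.
def pvWhileFillA : Nat → List String → String → List String
  | 0, out, _ => out
  | fuel + 1, out, v =>
    match PySem.List.index? out "x" with
    | none => out
    | some i => pvWhileFillA fuel (out.set i v) v

-- the for-loop of A, state (output, num_id, num_str); num_str kept as List Char
def pvLoopA : List Char → List String → List String → List Char → List String × List String
  | [], output, num_id, num_str =>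
    if num_str ≠ [] then
      let num_id' := num_id ++ [String.ofList num_str]
      let v := PySem.Int.toStr ((num_id'.length : Int) - 1)
      (pvWhileFillA (output.count "x") output v, num_id')
    else (output, num_id)
  | n :: rest, output, num_id, num_str =>
    if ¬ PySem.Chars.isdigit n then
      if num_str ≠ [] then
        let num_id' := num_id ++ [String.ofList num_str]
        let v := PySem.Int.toStr ((num_id'.length : Int) - 1)
        pvLoopA rest (pvWhileFillA (output.count "x") output v ++ [String.ofList [n]]) num_id' []
      else
        pvLoopA rest (output ++ [String.ofList [n]]) num_id num_str
    else
      pvLoopA rest (output ++ ["x"]) num_id (num_str ++ [n])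

def parse_num_and_space (input : String) (num_id : List String) : List String × List String :=
  pvLoopA input.toList [] num_id []

-- ===== PORT B =====
-- B's flush: write the id string into the recorded pending indices
def pvFlushB (output : List String) (pending : List Nat) (v : String) : List String :=
  pending.foldl (fun o i => o.set i v) output

-- the for-loop of B, state (output, pending, num_id, num)
def pvLoopB : List Char → List String → List Nat → List String → List Char → List String × List String
  | [], output, pending, num_id, num =>
    if num ≠ [] then
      let num_id' := num_id ++ [String.ofList num]
      let v := PySem.Int.toStr ((num_id'.length : Int) - 1)
      (pvFlushB output pending v, num_id')
    else (output, num_id)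
  | n :: rest, output, pending, num_id, num =>
    if PySem.Chars.isdigit n then
      pvLoopB rest (output ++ ["x"]) (pending ++ [output.length]) num_id (num ++ [n])
    else
      if num ≠ [] then
        let num_id' := num_id ++ [String.ofList num]
        let v := PySem.Int.toStr ((num_id'.length : Int) - 1)
        let output' := pvFlushB output pending v
        pvLoopB rest (output' ++ [String.ofList [n]])
          (if String.ofList [n] = "x" then [output'.length] else []) num_id' []
      else
        pvLoopB rest (output ++ [String.ofList [n]])
          (if String.ofList [n] = "x" then pending ++ [output.length] else pending) num_id num

def parse_num_and_space_alt (input : String) (num_id : List String) : List String × List String :=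
  pvLoopB input.toList [] [] num_id []

-- ===== PRECONDITION & SPEC =====
def Spec_parse_num_and_space (input : String) (num_id : List String) (out : List String × List String) : Prop := out = parse_num_and_space_alt input num_id
instance (input : String) (num_id : List String) (out : List String × List String) : Decidable (Spec_parse_num_and_space input num_id out) := by unfold Spec_parse_num_and_space; infer_instance

-- ===== CLAIM (what is proved, stated in full; the proofs are below) =====
def Claim_equal_parse_num_and_space : Prop := ∀ (input : String) (num_id : List String), Dom_parse_num_and_space input num_id → Spec_parse_num_and_space input num_id (parse_num_and_space input num_id)

-- ===== LEMMAS AND PROOFS =====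

-- str(n) for n ≥ 0 is made of digitChars, hence never the string "x"
theorem pv_digitChar_ne_x (n : Nat) : Nat.digitChar n ≠ 'x' := by
  by_cases h : n < 16
  · interval_cases n <;> decide
  · unfold Nat.digitChar
    rw [if_neg (by omega), if_neg (by omega), if_neg (by omega), if_neg (by omega),
        if_neg (by omega), if_neg (by omega), if_neg (by omega), if_neg (by omega),
        if_neg (by omega), if_neg (by omega), if_neg (by omega), if_neg (by omega),
        if_neg (by omega), if_neg (by omega), if_neg (by omega), if_neg (by omega)]
    decide

-- the pointwise substitution is the identity on a list without "x"
theorem pv_map_id_of_no_x (out : List String) (v : String) (h : "x" ∉ out) :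
    out.map (fun s => if s = "x" then v else s) = out := by
  conv_rhs => rw [← List.map_id out]
  apply List.map_congr_left
  intro s hs
  show (if s = "x" then v else s) = id s
  rw [if_neg (show ¬ s = "x" from fun hh => h (hh ▸ hs))]
  rfl

theorem pv_toDigitsCore_ne_x (f : Nat) : ∀ (n : Nat) (ds : List Char),
    (∀ c ∈ ds, c ≠ 'x') → ∀ c ∈ Nat.toDigitsCore 10 f n ds, c ≠ 'x' := by
  induction f with
  | zero => intro n ds h c hc; exact h c hc
  | succ f ih =>
    intro n ds h c hc
    simp only [Nat.toDigitsCore] at hc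
    have hds : ∀ c ∈ (n % 10).digitChar :: ds, c ≠ 'x' := by
      intro c hc
      rcases List.mem_cons.mp hc with rfl | hc
      · exact pv_digitChar_ne_x _
      · exact h c hc
    by_cases hz : n / 10 = 0
    · simp only [hz, if_pos rfl] at hc; exact hds c hc
    · simp only [if_neg hz] at hc; exact ih _ _ hds c hc

theorem pv_toStr_ne_x (n : Int) (hn : 0 ≤ n) : PySem.Int.toStr n ≠ "x" := by
  intro h
  have h' : (PySem.Int.toStr n).toList = ['x'] := by rw [h]; rfl
  rw [PySem.Int.toList_toStr] at h'
  unfold PySem.Int.toChars at h'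
  rw [if_neg (by omega)] at h'
  have hx : 'x' ∈ Nat.toDigits 10 n.toNat := by rw [h']; simp
  exact pv_toDigitsCore_ne_x _ _ _ (by simp) 'x' hx rfl

-- A's while loop replaces every "x" by v (v ≠ "x"): it is List.map of the pointwise substitution
theorem pv_fillA_eq_map (fuel : Nat) : ∀ (out : List String) (v : String), v ≠ "x" →
    out.count "x" ≤ fuel →
    pvWhileFillA fuel out v = out.map (fun s => if s = "x" then v else s) := by
  induction fuel with
  | zero =>
    intro out v hv hc
    have hnx : "x" ∉ out := by
      rw [← List.count_eq_zero]; omega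
    simp only [pvWhileFillA]
    rw [pv_map_id_of_no_x _ _ hnx]
  | succ fuel ih =>
    intro out v hv hc
    simp only [pvWhileFillA]
    cases hidx : PySem.List.index? out "x" with
    | none =>
      have hnx : "x" ∉ out := (PySem.List.index?_eq_none_iff _ _).mp hidx
      rw [pv_map_id_of_no_x _ _ hnx]
    | some i =>
      obtain ⟨pre, suf, hout, hlen, hpre⟩ := (PySem.List.index?_eq_some_iff _ _ _).mp hidx
      subst hout
      have hset : (pre ++ "x" :: suf).set i v = pre ++ v :: suf := by
        rw [← hlen]; simp [List.set_append]
      show pvWhileFillA fuel ((pre ++ "x" :: suf).set i v) v =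
        (pre ++ "x" :: suf).map (fun s => if s = "x" then v else s)
      rw [hset]
      have hcount : (pre ++ v :: suf).count "x" ≤ fuel := by
        have h1 : (pre ++ "x" :: suf).count "x" = pre.count "x" + (suf.count "x" + 1) := by
          simp [List.count_append, List.count_cons]
        have h2 : (pre ++ v :: suf).count "x" = pre.count "x" + suf.count "x" := by
          simp [List.count_append, List.count_cons, hv]
        omega
      rw [ih _ v hv hcount]
      simp only [List.map_append, List.map_cons]
      rw [pv_map_id_of_no_x _ _ hpre]
      simp [hv]

-- B's flush sets v at each pending index, else keeps the value (length preserved)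
theorem pv_flushB_getElem? (pending : List Nat) : ∀ (out : List String) (v : String) (j : Nat),
    (pvFlushB out pending v)[j]? = if j ∈ pending ∧ j < out.length then some v else out[j]? := by
  induction pending with
  | nil => intro out v j; simp [pvFlushB]
  | cons i rest ih =>
    intro out v j
    simp only [pvFlushB, List.foldl_cons] at *
    rw [ih]
    by_cases hj : j ∈ rest ∧ j < (out.set i v).length
    · rw [if_pos hj, if_pos ⟨List.mem_cons_of_mem _ hj.1, by simpa using hj.2⟩]
    · rw [if_neg hj]
      simp only [List.length_set] at hj
      by_cases hji : j = i
      · subst hji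
        by_cases hlt : j < out.length
        · rw [List.getElem?_set_self (by omega), if_pos ⟨List.mem_cons_self, hlt⟩]
        · rw [if_neg (fun h => hlt h.2), List.getElem?_set]
          simp [Nat.le_of_not_lt hlt, List.getElem?_eq_none (Nat.le_of_not_lt hlt)]
      · rw [List.getElem?_set_ne (fun h => hji h.symm)]
        rw [if_neg (fun h => by
          rcases List.mem_cons.mp h.1 with h' | h'
          · exact hji h'
          · exact hj ⟨h', h.2⟩)]

-- the invariant: pending lists exactly the positions of "x" in output
def pvInv (output : List String) (pending : List Nat) : Prop :=
  ∀ i : Nat, i ∈ pending ↔ (i < output.length ∧ output[i]? = some "x")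

-- under the invariant, B's flush equals the same pointwise substitution as A's while loop
theorem pv_flushB_eq_map (output : List String) (pending : List Nat) (v : String)
    (hinv : pvInv output pending) :
    pvFlushB output pending v = output.map (fun s => if s = "x" then v else s) := by
  apply List.ext_getElem?
  intro j
  rw [pv_flushB_getElem?, List.getElem?_map]
  by_cases hj : j < output.length
  · rw [List.getElem?_eq_getElem hj]
    simp only [Option.map_some]
    by_cases hx : output[j] = "x"
    · rw [if_pos ⟨(hinv j).mpr ⟨hj, by rw [List.getElem?_eq_getElem hj, hx]⟩, hj⟩, hx, if_pos rfl]
    · rw [if_neg, if_neg hx]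
      rintro ⟨hmem, -⟩
      obtain ⟨-, heq⟩ := (hinv j).mp hmem
      rw [List.getElem?_eq_getElem hj] at heq
      exact hx (Option.some.inj heq)
  · have hn : output[j]? = none := List.getElem?_eq_none (Nat.le_of_not_lt hj)
    rw [hn, if_neg (fun h => hj h.2)]
    simp

-- the substituted output contains no "x" (v ≠ "x")
theorem pv_map_no_x (output : List String) (v : String) (hv : v ≠ "x") :
    "x" ∉ output.map (fun s => if s = "x" then v else s) := by
  intro h
  obtain ⟨s, _, hs⟩ := List.mem_map.mp h
  by_cases hx : s = "x"
  · rw [if_pos hx] at hs; exact hv hs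
  · rw [if_neg hx] at hs; exact hx hs

-- invariant for an output list with no "x", empty pending
theorem pvInv_no_x (output : List String) (h : "x" ∉ output) : pvInv output [] := by
  intro i
  simp only [List.not_mem_nil, false_iff]
  rintro ⟨hlt, heq⟩
  exact h (List.mem_of_getElem? heq)

-- invariant extension when appending one element
theorem pvInv_append (output : List String) (pending : List Nat) (s : String)
    (hinv : pvInv output pending) :
    pvInv (output ++ [s]) (if s = "x" then pending ++ [output.length] else pending) := by
  intro i
  by_cases hx : s = "x" <;> simp only [hx, if_pos, if_neg, ite_true, ite_false]
  · subst hx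
    constructor
    · intro h
      rcases List.mem_append.mp h with h | h
      · obtain ⟨hlt, heq⟩ := (hinv i).mp h
        exact ⟨by simp; omega, by rw [List.getElem?_append_left hlt]; exact heq⟩
      · have hi : i = output.length := by simpa using h
        subst hi
        exact ⟨by simp, by simp⟩
    · rintro ⟨hlt, heq⟩
      by_cases hi : i < output.length
      · rw [List.getElem?_append_left hi] at heq
        exact List.mem_append_left _ ((hinv i).mpr ⟨hi, heq⟩)
      · have : i = output.length := by simp at hlt; omega
        subst this
        simp
  · constructor
    · intro h
      obtain ⟨hlt, heq⟩ := (hinv i).mp h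
      exact ⟨by simp; omega, by rw [List.getElem?_append_left hlt]; exact heq⟩
    · rintro ⟨hlt, heq⟩
      by_cases hi : i < output.length
      · rw [List.getElem?_append_left hi] at heq
        exact (hinv i).mpr ⟨hi, heq⟩
      · have : i = output.length := by simp at hlt; omega
        subst this
        rw [List.getElem?_append_right (le_refl _)] at heq
        simp at heq
        exact absurd heq hx

-- main induction: under the invariant the two loops agree
theorem pv_loops_agree (rest : List Char) : ∀ (output : List String) (pending : List Nat)
    (num_id : List String) (num : List Char), pvInv output pending →
    pvLoopA rest output num_id num = pvLoopB rest output pending num_id num := by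
  induction rest with
  | nil =>
    intro output pending num_id num hinv
    simp only [pvLoopA, pvLoopB]
    by_cases hn : num ≠ []
    · rw [if_pos hn, if_pos hn]
      have hv : PySem.Int.toStr (((num_id ++ [String.ofList num]).length : Int) - 1) ≠ "x" :=
        pv_toStr_ne_x _ (by simp)
      rw [pv_fillA_eq_map _ _ _ hv (le_refl _), pv_flushB_eq_map _ _ _ hinv]
    · rw [if_neg hn, if_neg hn]
  | cons n rest ih =>
    intro output pending num_id num hinv
    simp only [pvLoopA, pvLoopB]
    by_cases hd : PySem.Chars.isdigit n = true
    · rw [if_neg (fun h => h hd), if_pos hd]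
      apply ih
      have h := pvInv_append output pending "x" hinv
      rw [if_pos rfl] at h
      exact h
    · rw [if_pos hd, if_neg hd]
      by_cases hn : num ≠ []
      · rw [if_pos hn, if_pos hn]
        set v := PySem.Int.toStr (((num_id ++ [String.ofList num]).length : Int) - 1) with hvdef
        have hv : v ≠ "x" := pv_toStr_ne_x _ (by simp)
        rw [pv_fillA_eq_map _ _ _ hv (le_refl _), pv_flushB_eq_map _ _ _ hinv]
        apply ih
        have hnx : "x" ∉ output.map (fun s => if s = "x" then v else s) := pv_map_no_x _ _ hv
        have h0 : pvInv (output.map (fun s => if s = "x" then v else s)) [] := pvInv_no_x _ hnx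
        have h := pvInv_append _ [] (String.ofList [n]) h0
        by_cases hxn : String.ofList [n] = "x"
        · rw [if_pos hxn] at h
          rw [if_pos hxn]
          simpa using h
        · rw [if_neg hxn] at h
          rw [if_neg hxn]
          exact h
      · rw [if_neg hn, if_neg hn]
        apply ih
        exact pvInv_append output pending (String.ofList [n]) hinv

-- ===== VERDICT (by name: the statement is the Claim_ definition above) =====
theorem parse_num_and_space_spec : Claim_equal_parse_num_and_space := by
  intro input num_id _
  unfold Spec_parse_num_and_space parse_num_and_space parse_num_and_space_alt
  exact pv_loops_agree input.toList [] [] num_id [] (by intro i; simp)
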